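-- pv_equiv track=rewrite | github.com/gdownersigma/Coursework-Advanced-Data-Week-1 | coding_problems/challenge/main.py | find_total_energy
-- ===== SOURCE A (Python) =====
-- def what_action(char: str) -> int:
--     """Returns 1 if pickup, 0 if nothing, -1 if put down."""
--     if char == '^':
--         return 1
--     elif char == 'v':
--         return -1
--     else:
--         return 0
--
-- def find_total_energy(instructions: str) -> int:
--     items_held = 0
--     distance_moved = 0
--     movements = []
--     for action in instructions:
--         if what_action(action) == 0:
--             distance_moved += 1
--         elif items_held == 0 and what_action(action) == -1:
--             items_held = 0
--             continue
--         movements.append((items_held, distance_moved))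
--         items_held += what_action(action)
--         distance_moved = 0
--     total_energy = 0
--     for movement in movements:
--         total_energy += movement[0] * movement[1]
--
--     return total_energy
-- ===== SOURCE B (Python) =====
-- def find_total_energy(instructions: str) -> int:
--     items_held = 0
--     total = 0
--     for c in instructions:
--         if c == '^':
--             items_held += 1
--         elif c == 'v':
--             if items_held > 0:
--                 items_held -= 1
--         else:
--             total += items_held
--     return total
-- ===== Notes on version B (the rewrite author's own statement) =====
-- stated objective: simpler
-- what changed: Single pass with two integer counters: the movements list of (items, distance) tuples and the second multiply-and-sum pass are removed, since the accumulated distance at each append is always 1 for movement characters and 0 for pickup/putdown characters.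
import Mathlib
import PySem

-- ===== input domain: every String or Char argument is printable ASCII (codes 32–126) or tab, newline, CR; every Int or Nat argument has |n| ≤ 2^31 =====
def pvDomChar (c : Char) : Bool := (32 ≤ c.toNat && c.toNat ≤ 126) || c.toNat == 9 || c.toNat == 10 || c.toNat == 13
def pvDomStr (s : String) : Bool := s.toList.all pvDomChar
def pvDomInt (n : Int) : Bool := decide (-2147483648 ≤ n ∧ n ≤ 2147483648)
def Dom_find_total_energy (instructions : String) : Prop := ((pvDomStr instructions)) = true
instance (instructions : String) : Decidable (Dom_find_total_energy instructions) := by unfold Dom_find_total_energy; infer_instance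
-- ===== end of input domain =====

-- B replaces A's movements list and second summation pass by one pass over the string with two integer counters (simpler, O(1) extra space).

-- ===== PORT A =====
def what_action (c : Char) : Int :=
  if c = '^' then 1 else if c = 'v' then -1 else 0

-- one iteration of A's loop; state = (items_held, distance_moved, movements)
def pvAStep (s : Int × Int × List (Int × Int)) (c : Char) : Int × Int × List (Int × Int) :=
  if what_action c = 0 then
    (s.1 + what_action c, 0, s.2.2 ++ [(s.1, s.2.1 + 1)])
  else if s.1 = 0 ∧ what_action c = -1 then
    (0, s.2.1, s.2.2)   -- 'continue' (items_held set to 0, already 0)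
  else
    (s.1 + what_action c, 0, s.2.2 ++ [(s.1, s.2.1)])

def pvEnergy (mv : List (Int × Int)) : Int :=
  mv.foldl (fun t m => t + m.1 * m.2) 0

def find_total_energy (instructions : String) : Int :=
  pvEnergy (instructions.toList.foldl pvAStep (0, 0, [])).2.2

-- ===== PORT B =====
-- one iteration of B's loop; state = (items_held, total)
def pvBStep (s : Int × Int) (c : Char) : Int × Int :=
  if c = '^' then (s.1 + 1, s.2)
  else if c = 'v' then (if s.1 > 0 then s.1 - 1 else s.1, s.2)
  else (s.1, s.2 + s.1)

def find_total_energy_alt (instructions : String) : Int :=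
  (instructions.toList.foldl pvBStep (0, 0)).2

-- ===== PRECONDITION & SPEC =====
def Spec_find_total_energy (instructions : String) (out : Int) : Prop := out = find_total_energy_alt instructions
instance (instructions : String) (out : Int) : Decidable (Spec_find_total_energy instructions out) := by unfold Spec_find_total_energy; infer_instance

-- ===== CLAIM (what is proved, stated in full; the proofs are below) =====
def Claim_equal_find_total_energy : Prop := ∀ (instructions : String), Dom_find_total_energy instructions → Spec_find_total_energy instructions (find_total_energy instructions)

-- ===== LEMMAS AND PROOFS =====
theorem pvEnergy_snoc (l : List (Int × Int)) (p : Int × Int) :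
    pvEnergy (l ++ [p]) = pvEnergy l + p.1 * p.2 := by
  unfold pvEnergy
  rw [List.foldl_append]
  simp [List.foldl]

-- loop invariant: A's state (ih, 0, mv) corresponds to B's state (ih, pvEnergy mv)
theorem pv_key (cs : List Char) : ∀ (ih : Int) (mv : List (Int × Int)), 0 ≤ ih →
    let a := cs.foldl pvAStep (ih, 0, mv)
    let b := cs.foldl pvBStep (ih, pvEnergy mv)
    a.1 = b.1 ∧ a.2.1 = 0 ∧ pvEnergy a.2.2 = b.2 := by
  induction cs with
  | nil => intro ih mv h; exact ⟨rfl, rfl, rfl⟩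
  | cons c cs IH =>
      intro ih mv h
      simp only [List.foldl]
      by_cases h1 : c = '^'
      · have : pvAStep (ih, 0, mv) c = (ih + 1, 0, mv ++ [(ih, (0:Int))]) := by
          simp [pvAStep, what_action, h1]
        rw [this]
        have hb : pvBStep (ih, pvEnergy mv) c = (ih + 1, pvEnergy mv) := by
          simp [pvBStep, h1]
        rw [hb]
        have := IH (ih + 1) (mv ++ [(ih, (0:Int))]) (by omega)
        simpa [pvEnergy_snoc] using this
      · by_cases h2 : c = 'v'
        · by_cases h3 : ih = 0
          · have ha : pvAStep (ih, 0, mv) c = (0, 0, mv) := by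
              simp [pvAStep, what_action, h2, h3]
            have hb : pvBStep (ih, pvEnergy mv) c = (ih, pvEnergy mv) := by
              simp [pvBStep, h2, h3]
            rw [ha, hb, h3]
            exact IH 0 mv (by omega)
          · have ha : pvAStep (ih, 0, mv) c = (ih - 1, 0, mv ++ [(ih, (0:Int))]) := by
              simp [pvAStep, what_action, h2, h3]
              ring
            have hb : pvBStep (ih, pvEnergy mv) c = (ih - 1, pvEnergy mv) := by
              have : ih > 0 := by omega
              simp [pvBStep, h2, this]
            rw [ha, hb]
            have := IH (ih - 1) (mv ++ [(ih, (0:Int))]) (by omega)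
            simpa [pvEnergy_snoc] using this
        · have ha : pvAStep (ih, 0, mv) c = (ih, 0, mv ++ [(ih, (1:Int))]) := by
            simp [pvAStep, what_action, h1, h2]
          have hb : pvBStep (ih, pvEnergy mv) c = (ih, pvEnergy mv + ih) := by
            simp [pvBStep, h1, h2]
          rw [ha, hb]
          have := IH ih (mv ++ [(ih, (1:Int))]) h
          simpa [pvEnergy_snoc] using this

-- ===== VERDICT (by name: the statement is the Claim_ definition above) =====
theorem find_total_energy_spec : Claim_equal_find_total_energy := by
  intro instructions _
  unfold Spec_find_total_energy find_total_energy find_total_energy_alt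
  have h := pv_key instructions.toList 0 [] (le_refl 0)
  simp only [pvEnergy, List.foldl] at h
  exact h.2.2
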